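-- pv_equiv track=rewrite | github.com/loveiscomplicated/longliveprince | 25-1/AI_programming/lab04/lab4_p4.py | lookAndSaySequence
-- ===== SOURCE A (Python) =====
-- def lookAndSaySequence(n ,l):
--     """
--     n : initial integer
--     l : the length of sequence
--
--     returns the list (sequence) of integers
--     and whether the sequence includes a cycle as a boolean flag
--     for the given initial integer n and the length of sequence l
--     """
--     def dictToListElem(dic : dict):
--         """
--         dic : dictionary used in the process
--
--         makes dict to string that is appropriate to output list element
--
--         returns : list element
--         """
--         sorted_dict = sorted(dic.items()) # sorting by keys in order to make it to element of result list
--         result = ''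
--         for i in sorted_dict:
--             result += str(i[1])
--             result += i[0]
--         return int(result)
--
--     def makeDict(prevN : int):
--         """
--         prevN : previous integer that has to be computed
--
--         calculates how many given numbers has appeared and stores as dict
--
--         returns a dictionary that stores the number of occurance
--         """
--         resultDict  = dict()
--         numStr = str(prevN) # numbers that converted into string (all keys are string)
--         for i in range(len(numStr)):
--             if numStr[i] in resultDict.keys():
--                 resultDict[numStr[i]] += 1
--             else:
--                 resultDict[numStr[i]] = 1
--
--         return resultDict
--
--     def flag(lst : list):
--         """
--         lst : list that has to be checked
--
--         checks whether given list has a cycle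
--
--         returns : True if the list is valid
--         """
--         maxCycle = len(lst) // 2
--         cycleSize = 1
--         while cycleSize <= maxCycle:
--             if lst[-cycleSize:] == lst[-2 * cycleSize : -cycleSize]:
--                 return True
--             cycleSize += 1
--         return False
--
--     # repeat makeDict and dictToListElem for l(alphabet) times
--     lst = [n]
--     prevN = n
--     for i in range(l - 1):
--         dic = makeDict(prevN)
--         lst.append(dictToListElem(dic))
--         prevN = dictToListElem(dic)
--
--     return lst, flag(lst)
-- ===== SOURCE B (Python) =====
-- def lookAndSaySequence(n, l):
--     """Same result as A: the digit-count sequence and a trailing-cycle flag.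
--     Each step counts digits by scanning the fixed alphabet '0'-'9' (no dict,
--     no sorting); the cycle check runs the Z-algorithm on the reversed
--     sequence: a trailing cycle of size k exists iff Z[k] >= k for some
--     k <= L//2."""
--     seq = [n]
--     cur = n
--     for _ in range(l - 1):
--         digs = str(cur)
--         out = ''
--         for d in '0123456789':
--             c = 0
--             for ch in digs:
--                 if ch == d:
--                     c += 1
--             if c:
--                 out += str(c) + d
--         cur = int(out)
--         seq.append(cur)
--     rev = seq[::-1]
--     L = len(rev)
--     z = [0]
--     zl = zr = 0
--     for i in range(1, L):
--         zi = min(zr - i, z[i - zl]) if i < zr else 0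
--         while i + zi < L and rev[zi] == rev[i + zi]:
--             zi += 1
--         z.append(zi)
--         if i + zi > zr:
--             zl, zr = i, i + zi
--     has_cycle = any(z[k] >= k for k in range(1, L // 2 + 1))
--     return seq, has_cycle
-- ===== Notes on version B (the rewrite author's own statement) =====
-- stated objective: alternative
-- what changed: B replaces A's quadratic suffix-slice cycle search by the Z-algorithm on the reversed sequence (a cycle of size k exists iff Z[k] >= k), and computes each term by a fixed-alphabet digit scan instead of A's dict plus sort.
import Mathlib
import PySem

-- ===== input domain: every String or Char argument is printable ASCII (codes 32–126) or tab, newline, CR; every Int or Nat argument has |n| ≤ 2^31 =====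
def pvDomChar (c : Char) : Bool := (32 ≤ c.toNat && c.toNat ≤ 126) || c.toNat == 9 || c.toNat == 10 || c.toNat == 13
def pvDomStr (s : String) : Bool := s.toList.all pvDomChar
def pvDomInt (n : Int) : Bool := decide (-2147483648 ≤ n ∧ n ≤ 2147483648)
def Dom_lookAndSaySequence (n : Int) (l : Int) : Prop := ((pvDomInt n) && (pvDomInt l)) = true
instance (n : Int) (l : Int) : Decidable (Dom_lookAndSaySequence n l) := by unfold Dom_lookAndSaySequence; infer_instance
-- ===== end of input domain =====

-- B replaces A's per-step dict + sort by a fixed-alphabet digit scan and A's quadratic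
-- suffix-slice cycle search by the Z-algorithm on the reversed sequence (alternative algorithm).


-- ===== PORT A =====
-- makeDict: count occurrences of each character of str(prevN) in an insertion-ordered dict
def pvMakeDict (prevN : Int) : PySem.Dict Char Int :=
  let numStr := PySem.Int.toChars prevN
  (PySem.List.pyRange 0 (numStr.length : Int) 1).foldl
    (fun d i =>
      let c := PySem.List.pyGetD numStr i ' '   -- numStr[i]; i is always in range here
      if d.contains c then d.insert c (d.getD c 0 + 1) else d.insert c 1)
    PySem.Dict.empty

-- dictToListElem: sorted(dic.items()) — the dict's keys are distinct, so Python's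
-- lexicographic pair sort is exactly the sort by key — then concatenate "count,key" and int(...)
def pvDictToListElem (dic : PySem.Dict Char Int) : Int :=
  let sortedDict := PySem.List.sorted dic.items (fun p => p.1)
  let result := sortedDict.foldl (fun acc p => acc ++ PySem.Int.toChars p.2 ++ [p.1]) ([] : List Char)
  -- int(result): under Pre_ the string is a nonempty digit string, so int() never raises;
  -- outside Pre_ Python A raises ValueError and nothing is claimed
  (PySem.Int.ofChars? result).getD 0

-- flag's while loop: cycleSize from 1 while cycleSize ≤ maxCycle, early return True
def pvFlagLoop (lst : List Int) (maxCycle : Int) (cycleSize : Int) : Bool :=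
  if cycleSize ≤ maxCycle then
    if PySem.List.slice lst (some (-cycleSize)) none ==
       PySem.List.slice lst (some (-(2 * cycleSize))) (some (-cycleSize)) then
      true
    else pvFlagLoop lst maxCycle (cycleSize + 1)
  else false
termination_by (maxCycle + 1 - cycleSize).toNat
decreasing_by omega

def pvFlag (lst : List Int) : Bool :=
  pvFlagLoop lst (PySem.Int.floordiv (lst.length : Int) 2) 1

def lookAndSaySequence (n : Int) (l : Int) : List Int × Bool :=
  let res := (PySem.List.pyRange 0 (l - 1) 1).foldl
    (fun st _ =>
      let dic := pvMakeDict st.2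
      (st.1 ++ [pvDictToListElem dic], pvDictToListElem dic))
    (([n], n) : List Int × Int)
  (res.1, pvFlag res.1)

-- ===== PORT B =====
def pvDigits : List Char := ['0', '1', '2', '3', '4', '5', '6', '7', '8', '9']  -- '0123456789'

-- one step: for each digit d in order, count its occurrences in str(cur) by a scan;
-- append "count,d" when the count is non-zero; int(...) of the result
def pvNextAlt (cur : Int) : Int :=
  let digs := PySem.Int.toChars cur
  let out := pvDigits.foldl
    (fun acc d =>
      let c : Int := digs.foldl (fun a ch => if ch == d then a + 1 else a) 0
      if c ≠ 0 then acc ++ PySem.Int.toChars c ++ [d] else acc)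
    ([] : List Char)
  (PySem.Int.ofChars? out).getD 0

-- the Z-algorithm's inner while loop: extend the match length zi while rev[zi] == rev[i+zi]
def pvZExtend (rev : List Int) (i : Int) (zi : Int) : Int :=
  if h : i + zi < (rev.length : Int) ∧
      PySem.List.pyGetD rev zi 0 = PySem.List.pyGetD rev (i + zi) 0 then
    pvZExtend rev i (zi + 1)
  else zi
termination_by ((rev.length : Int) - (i + zi)).toNat
decreasing_by omega

-- one iteration of the Z-algorithm's main loop: state (z, zl, zr)
def pvZStep (rev : List Int) (st : List Int × Int × Int) (i : Int) : List Int × Int × Int :=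
  let z := st.1
  let zl := st.2.1
  let zr := st.2.2
  let zi0 := if i < zr then min (zr - i) (PySem.List.pyGetD z (i - zl) 0) else 0
  let zi := pvZExtend rev i zi0
  let z' := z ++ [zi]
  if i + zi > zr then (z', i, i + zi) else (z', zl, zr)

def lookAndSaySequence_alt (n : Int) (l : Int) : List Int × Bool :=
  let res := (PySem.List.pyRange 0 (l - 1) 1).foldl
    (fun st _ =>
      let nxt := pvNextAlt st.2
      (st.1 ++ [nxt], nxt))
    (([n], n) : List Int × Int)
  let seq := res.1
  let rev := seq.reverse   -- seq[::-1]
  let zst := (PySem.List.pyRange 1 (rev.length : Int) 1).foldl (pvZStep rev)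
    (([0], 0, 0) : List Int × Int × Int)
  let z := zst.1
  let hasCycle := (PySem.List.pyRange 1 (PySem.Int.floordiv (rev.length : Int) 2 + 1) 1).any
    (fun k => decide (k ≤ PySem.List.pyGetD z k 0))
  (seq, hasCycle)

-- ===== PRECONDITION & SPEC =====
-- Pre_ excludes exactly the inputs where Python A raises: for n < 0 and l ≥ 2 the first
-- rewritten string contains the '-' sign between digits and int() raises ValueError.
def Pre_lookAndSaySequence (n : Int) (l : Int) : Prop := 0 ≤ n ∨ l ≤ 1
instance (n : Int) (l : Int) : Decidable (Pre_lookAndSaySequence n l) := by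
  unfold Pre_lookAndSaySequence; infer_instance

def pvWitness_lookAndSaySequence : Int × Int := (1, 8)

def Spec_lookAndSaySequence (n : Int) (l : Int) (out : List Int × Bool) : Prop := out = lookAndSaySequence_alt n l
instance (n : Int) (l : Int) (out : List Int × Bool) : Decidable (Spec_lookAndSaySequence n l out) := by unfold Spec_lookAndSaySequence; infer_instance

-- ===== CLAIM (what is proved, stated in full; the proofs are below) =====
def Claim_equal_lookAndSaySequence : Prop := ∀ (n : Int) (l : Int), Dom_lookAndSaySequence n l → Pre_lookAndSaySequence n l → Spec_lookAndSaySequence n l (lookAndSaySequence n l)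


-- ===== LEMMAS AND PROOFS =====

-- every character produced by Nat.toDigits 10 is a decimal digit
theorem pv_mem_toDigitsCore (fuel : Nat) : ∀ (m : Nat) (acc : List Char),
    (∀ c ∈ acc, c ∈ pvDigits) → ∀ c ∈ Nat.toDigitsCore 10 fuel m acc, c ∈ pvDigits := by
  induction fuel with
  | zero => intro m acc hacc c hc; exact hacc c hc
  | succ f ih =>
    intro m acc hacc c hc
    have hd : Nat.digitChar (m % 10) ∈ pvDigits := by
      have h10 : m % 10 < 10 := Nat.mod_lt _ (by norm_num)
      interval_cases hmm : (m % 10) <;> decide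
    have hacc' : ∀ x ∈ (Nat.digitChar (m % 10) :: acc), x ∈ pvDigits := by
      intro x hx
      rcases List.mem_cons.mp hx with h | h
      · subst h; exact hd
      · exact hacc x h
    rw [Nat.toDigitsCore] at hc
    split at hc
    · exact hacc' c hc
    · exact ih _ _ hacc' c hc

theorem pv_toChars_subset_digits (m : Int) (hm : 0 ≤ m) :
    ∀ c ∈ PySem.Int.toChars m, c ∈ pvDigits := by
  intro c hc
  unfold PySem.Int.toChars at hc
  rw [if_neg (by omega)] at hc
  exact pv_mem_toDigitsCore _ _ [] (by intro x hx; cases hx) c hc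

theorem pv_bind_nat_nonneg (o : Option Nat) :
    0 ≤ (Option.map (fun n => n) (o.bind fun a => some ((a : Int)))).getD 0 := by
  cases o <;> simp

-- int(s) of a pure digit string is never negative (when it parses at all)
theorem pv_ofChars?_digits_nonneg (cs : List Char) (h : ∀ c ∈ cs, c ∈ pvDigits) :
    0 ≤ (PySem.Int.ofChars? cs).getD 0 := by
  have hns : ∀ c ∈ cs, PySem.Int.isIntSpace c = false := by
    intro c hc
    have hcd := h c hc
    fin_cases hcd <;> decide
  have h1 : List.dropWhile PySem.Int.isIntSpace cs = cs := by
    cases cs with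
    | nil => rfl
    | cons a l => rw [List.dropWhile_cons_of_neg]; simp [hns a (by simp)]
  have h2 : List.dropWhile PySem.Int.isIntSpace cs.reverse = cs.reverse := by
    cases hr : cs.reverse with
    | nil => rfl
    | cons a l =>
      rw [List.dropWhile_cons_of_neg]
      have : a ∈ cs := by
        have : a ∈ cs.reverse := by rw [hr]; simp
        simpa using this
      simp [hns a this]
  unfold PySem.Int.ofChars?
  rw [h1, h2, List.reverse_reverse]
  dsimp only
  cases cs with
  | nil => exact pv_bind_nat_nonneg _
  | cons a l =>
    have had := h a (by simp)
    have hne : a ≠ '-' ∧ a ≠ '+' := by fin_cases had <;> decide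
    rcases hne with ⟨hm, hp⟩
    split
    · next cs ds heq => rw [List.cons_eq_cons] at heq; exact absurd heq.1 hm
    · next cs ds heq => rw [List.cons_eq_cons] at heq; exact absurd heq.1 hp
    · exact pv_bind_nat_nonneg _

theorem pv_flatMap_ite (l : List Char) (p : Char → Prop) [DecidablePred p] (g : Char → List Char) :
    l.flatMap (fun d => if p d then g d else []) = (l.filter (fun d => decide (p d))).flatMap g := by
  induction l with
  | nil => rfl
  | cons a t ih =>
    by_cases h : p a <;> simp [List.flatMap_cons, h, ih]

theorem pv_makeDict_eq_counter (m : Int) :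
    pvMakeDict m = PySem.Dict.counter (PySem.Int.toChars m) := by
  have h1 := PySem.List.foldl_pyRange_zero_pyGetD' (PySem.Int.toChars m) ' '
      (fun (d : PySem.Dict Char Int) (c : Char) =>
        if d.contains c then d.insert c (d.getD c 0 + 1) else d.insert c 1)
      PySem.Dict.empty
  have h2 : (fun (d : PySem.Dict Char Int) (c : Char) =>
        if d.contains c then d.insert c (d.getD c 0 + 1) else d.insert c 1)
      = (fun d c => d.insert c (d.getD c 0 + 1)) := by
    funext d c
    by_cases h : d.contains c
    · simp [h]
    · rw [if_neg h, PySem.Dict.getD_of_not_contains d 0 (by simpa using h)]; norm_num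
  unfold pvMakeDict
  refine Eq.trans h1 ?_
  rw [h2, PySem.Dict.foldl_insert_getD_add_one_eq_counter]

-- B's per-step loop, written as a flatMap over the digit alphabet
theorem pv_fold_B_eq_flatMap (cs : List Char) :
    pvDigits.foldl
      (fun acc d =>
        let c : Int := cs.foldl (fun a ch => if ch == d then a + 1 else a) 0
        if c ≠ 0 then acc ++ PySem.Int.toChars c ++ [d] else acc) ([] : List Char) =
    pvDigits.flatMap (fun d =>
      if (cs.count d : Int) ≠ 0 then PySem.Int.toChars (cs.count d : Int) ++ [d] else []) := by
  rw [show (fun (acc : List Char) (d : Char) =>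
        let c : Int := cs.foldl (fun a ch => if ch == d then a + 1 else a) 0
        if c ≠ 0 then acc ++ PySem.Int.toChars c ++ [d] else acc)
      = (fun acc d => acc ++ (if (cs.count d : Int) ≠ 0 then PySem.Int.toChars (cs.count d : Int) ++ [d] else [])) from by
    funext acc d
    show (if (cs.foldl (fun a ch => if ch == d then a + 1 else a) 0 : Int) ≠ 0
          then acc ++ PySem.Int.toChars (cs.foldl (fun a ch => if ch == d then a + 1 else a) 0) ++ [d] else acc) = _
    rw [PySem.List.foldl_beq_add_one]
    simp only [zero_add]
    by_cases hc : ((cs.count d : Int)) ≠ 0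
    · rw [if_pos hc, if_pos hc, List.append_assoc]
    · rw [if_neg hc, if_neg hc, List.append_nil]]
  rw [PySem.List.foldl_append_eq_flatMap]
  simp

-- the string A builds in one step equals the string B builds in one step
theorem pv_step_string_eq (cs : List Char) (h : ∀ c ∈ cs, c ∈ pvDigits) :
    (PySem.List.sorted (PySem.Dict.counter cs).items (fun p => p.1)).foldl
        (fun acc p => acc ++ PySem.Int.toChars p.2 ++ [p.1]) ([] : List Char) =
      pvDigits.foldl
        (fun acc d =>
          let c : Int := cs.foldl (fun a ch => if ch == d then a + 1 else a) 0
          if c ≠ 0 then acc ++ PySem.Int.toChars c ++ [d] else acc)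
        ([] : List Char) := by
  have hsorted : PySem.List.sorted (PySem.Dict.counter cs).items (fun p => p.1) =
      (pvDigits.filter (fun d => cs.contains d)).map (fun d => (d, (cs.count d : Int))) := by
    rw [PySem.Dict.items_counter]
    apply PySem.List.sorted_eq_of_perm_of_pairwise_lt
    · apply List.Perm.map
      rw [List.perm_ext_iff_of_nodup (List.Nodup.filter _ (by decide)) (PySem.Set.nodup_ofList cs)]
      intro a
      simp only [List.mem_filter, PySem.Set.mem_ofList, List.contains_iff_mem]
      constructor
      · rintro ⟨_, hb⟩; exact hb
      · intro ha; exact ⟨h a ha, ha⟩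
    · rw [List.pairwise_map]
      have hpw : List.Pairwise (· < ·) pvDigits := by decide
      exact List.Pairwise.filter _ hpw
  rw [hsorted]
  have hL : ((pvDigits.filter (fun d => cs.contains d)).map (fun d => (d, (cs.count d : Int)))).foldl
      (fun acc p => acc ++ PySem.Int.toChars p.2 ++ [p.1]) ([] : List Char) =
      (pvDigits.filter (fun d => cs.contains d)).flatMap
        (fun d => PySem.Int.toChars (cs.count d : Int) ++ [d]) := by
    rw [show (fun (acc : List Char) (p : Char × Int) => acc ++ PySem.Int.toChars p.2 ++ [p.1])
        = (fun acc p => acc ++ (PySem.Int.toChars p.2 ++ [p.1])) from by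
      funext acc p; rw [List.append_assoc]]
    rw [PySem.List.foldl_append_eq_flatMap]
    simp [List.flatMap_map]
  rw [hL, pv_fold_B_eq_flatMap, pv_flatMap_ite pvDigits (fun d => (cs.count d : Int) ≠ 0) _]
  congr 1
  apply List.filter_congr
  intro d _
  rw [Bool.eq_iff_iff]
  simp [List.count_eq_zero]

theorem pv_step_eq (m : Int) (hm : 0 ≤ m) :
    pvDictToListElem (pvMakeDict m) = pvNextAlt m := by
  unfold pvDictToListElem pvNextAlt
  dsimp only
  rw [pv_makeDict_eq_counter,
      pv_step_string_eq (PySem.Int.toChars m) (pv_toChars_subset_digits m hm)]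

theorem pv_nextAlt_nonneg (m : Int) : 0 ≤ pvNextAlt m := by
  unfold pvNextAlt
  dsimp only
  rw [pv_fold_B_eq_flatMap]
  apply pv_ofChars?_digits_nonneg
  intro c hc
  rw [List.mem_flatMap] at hc
  rcases hc with ⟨d, hd, hcm⟩
  by_cases hz : (((PySem.Int.toChars m).count d : Int)) ≠ 0
  · rw [if_pos hz, List.mem_append] at hcm
    rcases hcm with hcm | hcm
    · exact pv_toChars_subset_digits _ (Int.natCast_nonneg _) c hcm
    · rw [List.mem_singleton] at hcm; exact hcm ▸ hd
  · rw [if_neg hz] at hcm; cases hcm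

-- the two sequence-building folds agree from any state with a nonnegative current value
theorem pv_fold_eq (xs : List Int) : ∀ (acc : List Int) (cur : Int), 0 ≤ cur →
    xs.foldl (fun st (_ : Int) =>
        let dic := pvMakeDict st.2
        (st.1 ++ [pvDictToListElem dic], pvDictToListElem dic)) (acc, cur) =
      xs.foldl (fun st (_ : Int) =>
        let nxt := pvNextAlt st.2
        (st.1 ++ [nxt], nxt)) (acc, cur) := by
  induction xs with
  | nil => intro acc cur _; rfl
  | cons x t ih =>
    intro acc cur hcur
    rw [List.foldl_cons, List.foldl_cons]
    show t.foldl _ (acc ++ [pvDictToListElem (pvMakeDict cur)], pvDictToListElem (pvMakeDict cur)) = _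
    rw [pv_step_eq cur hcur]
    exact ih _ _ (pv_nextAlt_nonneg cur)

-- B's sequence fold keeps the accumulator non-empty
theorem pv_fold_fst_ne_nil (xs : List Int) : ∀ (acc : List Int) (cur : Int), acc ≠ [] →
    (xs.foldl (fun st (_ : Int) =>
        let nxt := pvNextAlt st.2
        (st.1 ++ [nxt], nxt)) (acc, cur)).1 ≠ [] := by
  induction xs with
  | nil => intro acc cur h; exact h
  | cons x t ih =>
    intro acc cur h
    rw [List.foldl_cons]
    exact ih _ _ (by simp)

theorem pv_slice_neg_neg (lst : List Int) (j k : Nat) (hjk : k ≤ j) (hj : j ≤ lst.length) (hk : 0 < k) :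
    PySem.List.slice lst (some (-(j : Int))) (some (-(k : Int))) =
      (lst.drop (lst.length - j)).take (j - k) := by
  show (List.take _ (List.drop _ lst)) = _
  dsimp only
  rw [PySem.List.clampIdx_neg_natCast _ j (by omega), PySem.List.clampIdx_neg_natCast _ k hk]
  congr 1
  omega

-- A's cycle test at size k equals the prefix test on the reversed list
theorem pv_cond_eq (lst : List Int) (k : Nat) (hk : 0 < k)
    (hk2 : 2 * k ≤ lst.length) :
    (PySem.List.slice lst (some (-(k : Int))) none ==
        PySem.List.slice lst (some (-(2 * (k : Int)))) (some (-(k : Int)))) =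
      (PySem.List.slice lst.reverse none (some (k : Int)) ==
        PySem.List.slice lst.reverse (some (k : Int)) (some (2 * (k : Int)))) := by
  have h2k : (-(2 * (k : Int))) = (-(((2 * k : Nat)) : Int)) := by push_cast; ring
  have h2k' : (2 * (k : Int)) = (((2 * k : Nat)) : Int) := by push_cast; ring
  rw [PySem.List.slice_from_neg_natCast lst k hk, h2k,
      pv_slice_neg_neg lst (2 * k) k (by omega) hk2 hk,
      PySem.List.slice_to_natCast, h2k', PySem.List.slice_natCast,
      List.take_reverse, List.drop_reverse, List.take_reverse]
  rw [Bool.eq_iff_iff, beq_iff_eq, beq_iff_eq, List.reverse_inj]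
  rw [List.drop_take, List.length_take]
  have e1 : min (lst.length - k) lst.length - (2 * k - k) = lst.length - 2 * k := by omega
  rw [e1]
  have e2 : lst.length - k - (lst.length - 2 * k) = 2 * k - k := by omega
  rw [e2]

theorem pv_flagLoop_eq_any (lst : List Int) (c : Int) (hc : 1 ≤ c) :
    pvFlagLoop lst (PySem.Int.floordiv (lst.length : Int) 2) c =
      (PySem.List.pyRange c (PySem.Int.floordiv (lst.length : Int) 2 + 1) 1).any
        (fun k => PySem.List.slice lst.reverse none (some k) ==
          PySem.List.slice lst.reverse (some k) (some (2 * k))) := by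
  have hM : PySem.Int.floordiv ((lst.length : Nat) : Int) 2 = ((lst.length / 2 : Nat) : Int) := by
    exact_mod_cast PySem.Int.floordiv_natCast lst.length 2
  set M := PySem.Int.floordiv ((lst.length : Nat) : Int) 2 with hMdef
  by_cases hle : c ≤ M
  · rw [pvFlagLoop, if_pos hle]
    rw [PySem.List.pyRange_one_cons (by omega), List.any_cons]
    have hkc : c = ((c.toNat : Nat) : Int) := by omega
    have hcond := pv_cond_eq lst c.toNat (by omega) (by omega)
    rw [hkc]
    rw [hcond]
    by_cases hb : (PySem.List.slice lst.reverse none (some ((c.toNat : Nat) : Int)) ==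
        PySem.List.slice lst.reverse (some ((c.toNat : Nat) : Int)) (some (2 * ((c.toNat : Nat) : Int)))) = true
    · rw [if_pos hb, hb]; simp
    · rw [if_neg hb]
      rw [Bool.not_eq_true] at hb
      rw [hb, Bool.false_or, ← hkc]
      exact pv_flagLoop_eq_any lst (c + 1) (by omega)
  · rw [pvFlagLoop, if_neg hle, PySem.List.pyRange_one_eq_nil (by omega)]
    rfl
termination_by (PySem.Int.floordiv (lst.length : Int) 2 + 1 - c).toNat
decreasing_by omega

-- ===== longest-common-prefix machinery for the Z-algorithm =====

def pvLcp : List Int → List Int → Nat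
  | a :: as, b :: bs => if a = b then pvLcp as bs + 1 else 0
  | _, _ => 0

theorem pvLcp_le_left : ∀ (s t : List Int), pvLcp s t ≤ s.length := by
  intro s
  induction s with
  | nil => intro t; cases t <;> simp [pvLcp]
  | cons a as ih =>
    intro t
    cases t with
    | nil => simp [pvLcp]
    | cons b bs =>
      by_cases h : a = b
      · simp only [pvLcp, if_pos h, List.length_cons]
        exact Nat.succ_le_succ (ih bs)
      · simp [pvLcp, h]

theorem pvLcp_le_right : ∀ (s t : List Int), pvLcp s t ≤ t.length := by
  intro s
  induction s with
  | nil => intro t; cases t <;> simp [pvLcp]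
  | cons a as ih =>
    intro t
    cases t with
    | nil => simp [pvLcp]
    | cons b bs =>
      by_cases h : a = b
      · simp only [pvLcp, if_pos h, List.length_cons]
        exact Nat.succ_le_succ (ih bs)
      · simp [pvLcp, h]

theorem pv_getElem?_eq_of_lt_lcp : ∀ (s t : List Int) (j : Nat), j < pvLcp s t →
    s[j]? = t[j]? := by
  intro s
  induction s with
  | nil => intro t j h; cases t <;> simp [pvLcp] at h
  | cons a as ih =>
    intro t j h
    cases t with
    | nil => simp [pvLcp] at h
    | cons b bs =>
      by_cases hab : a = b
      · cases j with
        | zero => simp [hab]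
        | succ j' =>
          simp only [List.getElem?_cons_succ]
          apply ih bs
          simp [pvLcp, hab] at h
          omega
      · simp [pvLcp, hab] at h

theorem pv_le_lcp : ∀ (m : Nat) (s t : List Int), m ≤ s.length → m ≤ t.length →
    (∀ j, j < m → s[j]? = t[j]?) → m ≤ pvLcp s t := by
  intro m
  induction m with
  | zero => intro s t _ _ _; exact Nat.zero_le _
  | succ m' ih =>
    intro s t hs ht hj
    cases s with
    | nil => simp at hs
    | cons a as =>
      cases t with
      | nil => simp at ht
      | cons b bs =>
        have h0 := hj 0 (Nat.succ_pos _)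
        simp only [List.getElem?_cons_zero, Option.some_inj] at h0
        have : m' ≤ pvLcp as bs := by
          apply ih as bs (by simpa using hs) (by simpa using ht)
          intro j hjm
          have := hj (j + 1) (by omega)
          simpa using this
        simp [pvLcp, h0]
        omega

-- the extend loop computes the exact longest common prefix of rev and rev[i:]
theorem pv_zextend_eq (rev : List Int) (i v : Int) (hi1 : 1 ≤ i) (hiL : i ≤ (rev.length : Int))
    (hv : 0 ≤ v) (hle : v.toNat ≤ pvLcp rev (rev.drop i.toNat)) :
    pvZExtend rev i v = (pvLcp rev (rev.drop i.toNat) : Int) := by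
  have hdl : (rev.drop i.toNat).length = rev.length - i.toNat := by simp
  rw [pvZExtend]
  by_cases h : i + v < (rev.length : Int) ∧
      PySem.List.pyGetD rev v 0 = PySem.List.pyGetD rev (i + v) 0
  · rw [dif_pos h]
    have hvlen : v.toNat < rev.length := by omega
    have hivlen : (i + v).toNat < rev.length := by omega
    have hlt : v.toNat < pvLcp rev (rev.drop i.toNat) := by
      apply pv_le_lcp (v.toNat + 1) rev (rev.drop i.toNat) (by omega) (by omega)
      intro j hjm
      by_cases hjv : j < v.toNat
      · exact pv_getElem?_eq_of_lt_lcp _ _ j (by omega)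
      · have hj : j = v.toNat := by omega
        subst hj
        rw [List.getElem?_drop]
        have e3 : i.toNat + v.toNat = (i + v).toNat := by omega
        rw [List.getElem?_eq_getElem hvlen, e3, List.getElem?_eq_getElem hivlen]
        have h2 := h.2
        rw [PySem.List.pyGetD_eq_getElem rev (i := v) 0 hv (by omega),
            PySem.List.pyGetD_eq_getElem rev (i := i + v) 0 (by omega) (by omega)] at h2
        exact congrArg some h2
    have := pv_zextend_eq rev i (v + 1) hi1 hiL (by omega) (by omega)
    rw [this]
  · rw [dif_neg h]
    have hge : pvLcp rev (rev.drop i.toNat) ≤ v.toNat := by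
      by_contra hcon
      rw [not_le] at hcon
      apply h
      have h3 := pv_getElem?_eq_of_lt_lcp rev (rev.drop i.toNat) v.toNat hcon
      have hvd : v.toNat < (rev.drop i.toNat).length :=
        lt_of_lt_of_le hcon (pvLcp_le_right _ _)
      have hvl : v.toNat < rev.length := lt_of_lt_of_le hcon (pvLcp_le_left _ _)
      have hivL : i + v < (rev.length : Int) := by omega
      refine ⟨hivL, ?_⟩
      rw [List.getElem?_drop] at h3
      have e3 : i.toNat + v.toNat = (i + v).toNat := by omega
      rw [e3] at h3
      have hivlen : (i + v).toNat < rev.length := by omega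
      rw [List.getElem?_eq_getElem hvl, List.getElem?_eq_getElem hivlen] at h3
      rw [PySem.List.pyGetD_eq_getElem rev (i := v) 0 hv (by omega),
          PySem.List.pyGetD_eq_getElem rev (i := i + v) 0 (by omega) (by omega)]
      exact Option.some_inj.mp h3
    omega
termination_by ((rev.length : Int) - (i + v)).toNat
decreasing_by omega

-- z-box transfer: the initial value min(zr-i, z[i-zl]) is a lower bound on lcp at i
theorem pv_box (rev : List Int) (zl i zr : Int) (h1 : 1 ≤ zl) (h2 : zl < i) (h3 : i < zr)
    (h4 : zr ≤ zl + (pvLcp rev (rev.drop zl.toNat) : Int)) :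
    (min (zr - i) ((pvLcp rev (rev.drop (i - zl).toNat) : Int))).toNat ≤
      pvLcp rev (rev.drop i.toNat) := by
  have hlcpb := pvLcp_le_right rev (rev.drop zl.toNat)
  have hdlb : (rev.drop zl.toNat).length = rev.length - zl.toNat := by simp
  have hzrL : zr ≤ (rev.length : Int) := by omega
  set m : Nat := (min (zr - i) ((pvLcp rev (rev.drop (i - zl).toNat) : Int))).toNat with hm
  apply pv_le_lcp m rev (rev.drop i.toNat) (by omega) (by simp; omega)
  intro j hjm
  rw [List.getElem?_drop]
  -- rev[j] = rev[(i-zl).toNat + j] via lcp at i - zl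
  have hj1 : j < pvLcp rev (rev.drop (i - zl).toNat) := by omega
  have e1 := pv_getElem?_eq_of_lt_lcp rev (rev.drop (i - zl).toNat) j hj1
  rw [List.getElem?_drop] at e1
  -- rev[(i-zl).toNat + j] = rev[zl.toNat + ((i-zl).toNat + j)] via lcp at zl
  have hj2 : (i - zl).toNat + j < pvLcp rev (rev.drop zl.toNat) := by omega
  have e2 := pv_getElem?_eq_of_lt_lcp rev (rev.drop zl.toNat) ((i - zl).toNat + j) hj2
  rw [List.getElem?_drop] at e2
  have e3 : zl.toNat + ((i - zl).toNat + j) = i.toNat + j := by omega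
  rw [e3] at e2
  exact e1.trans e2

-- z[j] as the loop computes it: 0 at j = 0, the lcp of rev and rev[j:] afterwards
def pvZspec (rev : List Int) (j : Nat) : Int :=
  if j = 0 then 0 else (pvLcp rev (rev.drop j) : Nat)

-- the Z-algorithm's main loop fills z with pvZspec
theorem pv_zfold (rev : List Int) (i : Int) (z : List Int) (zl zr : Int)
    (h1 : 1 ≤ i) (h2 : i ≤ (rev.length : Int))
    (hz : z = (List.range i.toNat).map (pvZspec rev))
    (hlb : 0 ≤ zl) (hlr : zl ≤ zr)
    (hbox : zr ≤ i ∨ (1 ≤ zl ∧ zl < i ∧ zr ≤ zl + (pvLcp rev (rev.drop zl.toNat) : Int))) :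
    ((PySem.List.pyRange i (rev.length : Int) 1).foldl (pvZStep rev) (z, zl, zr)).1
      = (List.range rev.length).map (pvZspec rev) := by
  by_cases hiL : i < (rev.length : Int)
  · rw [PySem.List.pyRange_one_cons hiL, List.foldl_cons]
    have hzlen : z.length = i.toNat := by rw [hz]; simp
    -- evaluate the step
    have hstep : pvZStep rev (z, zl, zr) i =
        (z ++ [(pvLcp rev (rev.drop i.toNat) : Int)],
          if i + (pvLcp rev (rev.drop i.toNat) : Int) > zr
          then (i, i + (pvLcp rev (rev.drop i.toNat) : Int)) else (zl, zr)) := by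
      unfold pvZStep
      dsimp only
      have hzi : pvZExtend rev i
          (if i < zr then min (zr - i) (PySem.List.pyGetD z (i - zl) 0) else 0) =
          (pvLcp rev (rev.drop i.toNat) : Int) := by
        by_cases hir : i < zr
        · rw [if_pos hir]
          rcases hbox with hb | ⟨hb1, hb2, hb3⟩
          · omega
          · have hidx : (i - zl).toNat < z.length := by omega
            have hzs : pvZspec rev (i - zl).toNat =
                (pvLcp rev (rev.drop (i - zl).toNat) : Int) := by
              unfold pvZspec
              rw [if_neg (by omega)]
            rw [PySem.List.pyGetD_eq_getElem z (i := i - zl) 0 (by omega) (by omega)]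
            simp only [hz, List.getElem_map, List.getElem_range]
            rw [hzs]
            have hmin0 : 0 ≤ min (zr - i) ((pvLcp rev (rev.drop (i - zl).toNat) : Int)) := by
              have : (0 : Int) ≤ (pvLcp rev (rev.drop (i - zl).toNat) : Int) := by positivity
              omega
            exact pv_zextend_eq rev i _ h1 h2 hmin0 (pv_box rev zl i zr hb1 hb2 hir hb3)
        · rw [if_neg hir]
          exact pv_zextend_eq rev i 0 h1 h2 le_rfl (by simp)
      rw [hzi]
      by_cases hgt : i + (pvLcp rev (rev.drop i.toNat) : Int) > zr
      · rw [if_pos hgt, if_pos hgt]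
      · rw [if_neg hgt, if_neg hgt]
    rw [hstep]
    have hznew : z ++ [(pvLcp rev (rev.drop i.toNat) : Int)] =
        (List.range (i + 1).toNat).map (pvZspec rev) := by
      have e1 : (i + 1).toNat = i.toNat + 1 := by omega
      rw [e1, List.range_succ, List.map_append, ← hz]
      congr 1
      simp only [List.map_cons, List.map_nil]
      congr 1
      unfold pvZspec
      rw [if_neg (by omega)]
    by_cases hgt : i + (pvLcp rev (rev.drop i.toNat) : Int) > zr
    · rw [if_pos hgt]
      exact pv_zfold rev (i + 1) _ i (i + (pvLcp rev (rev.drop i.toNat) : Int))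
        (by omega) (by omega) hznew (by omega) (by have := Int.natCast_nonneg (pvLcp rev (rev.drop i.toNat)); omega)
        (Or.inr ⟨by omega, by omega, le_refl _⟩)
    · rw [if_neg hgt]
      refine pv_zfold rev (i + 1) _ zl zr (by omega) (by omega) hznew hlb hlr ?_
      rcases hbox with hb | ⟨hb1, hb2, hb3⟩
      · exact Or.inl (by omega)
      · exact Or.inr ⟨hb1, by omega, hb3⟩
  · have hieq : i = (rev.length : Int) := by omega
    rw [PySem.List.pyRange_one_eq_nil (by omega), List.foldl_nil]
    simp only
    rw [hz, hieq]
    simp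
termination_by ((rev.length : Int) - i).toNat
decreasing_by all_goals omega

-- prefix test on the reversed list ↔ lcp threshold
theorem pv_take_eq_iff_lcp (rev : List Int) (k : Nat) (hk1 : 1 ≤ k) (hk2 : 2 * k ≤ rev.length) :
    (rev.take k = (rev.drop k).take k) ↔ k ≤ pvLcp rev (rev.drop k) := by
  constructor
  · intro heq
    apply pv_le_lcp k rev (rev.drop k) (by omega) (by simp; omega)
    intro j hj
    have e1 : (rev.take k)[j]? = rev[j]? := by
      rw [List.getElem?_take]
      rw [if_pos hj]
    have e2 : ((rev.drop k).take k)[j]? = (rev.drop k)[j]? := by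
      rw [List.getElem?_take]
      rw [if_pos hj]
    rw [← e1, ← e2, heq]
  · intro hle
    apply List.ext_getElem?
    intro j
    by_cases hj : j < k
    · rw [List.getElem?_take, if_pos hj, List.getElem?_take, if_pos hj]
      exact pv_getElem?_eq_of_lt_lcp _ _ j (by omega)
    · rw [List.getElem?_take, if_neg hj, List.getElem?_take, if_neg hj]

theorem pv_any_congr (xs : List Int) (f g : Int → Bool) (h : ∀ x ∈ xs, f x = g x) :
    xs.any f = xs.any g := by
  induction xs with
  | nil => rfl
  | cons a t ih =>
    rw [List.any_cons, List.any_cons, h a (by simp), ih (fun x hx => h x (by simp [hx]))]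

-- A's flag equals B's Z-based cycle test, for any non-empty sequence
theorem pv_flag_eq_z (seq : List Int) (hne : seq ≠ []) :
    pvFlag seq =
      (PySem.List.pyRange 1 (PySem.Int.floordiv ((seq.reverse.length : Nat) : Int) 2 + 1) 1).any
        (fun k => decide (k ≤ PySem.List.pyGetD
          ((PySem.List.pyRange 1 ((seq.reverse.length : Nat) : Int) 1).foldl (pvZStep seq.reverse)
            (([0], 0, 0) : List Int × Int × Int)).1 k 0)) := by
  have hlen : seq.reverse.length = seq.length := by simp
  have hL1 : 1 ≤ seq.length := by
    cases seq with
    | nil => exact absurd rfl hne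
    | cons a t => simp
  have hz : ((PySem.List.pyRange 1 ((seq.reverse.length : Nat) : Int) 1).foldl (pvZStep seq.reverse)
      (([0], 0, 0) : List Int × Int × Int)).1 = (List.range seq.reverse.length).map (pvZspec seq.reverse) := by
    apply pv_zfold seq.reverse 1 [0] 0 0 le_rfl (by exact_mod_cast hlen ▸ hL1)
      (by simp [pvZspec]) le_rfl le_rfl (Or.inl (by omega))
  rw [hz]
  unfold pvFlag
  rw [pv_flagLoop_eq_any seq 1 le_rfl]
  rw [hlen]
  apply pv_any_congr
  intro k hk
  rw [PySem.List.mem_pyRange_one] at hk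
  have hM : PySem.Int.floordiv ((seq.length : Nat) : Int) 2 = ((seq.length / 2 : Nat) : Int) := by
    exact_mod_cast PySem.Int.floordiv_natCast seq.length 2
  rw [hM] at hk
  have hk1 : 1 ≤ k.toNat := by omega
  have hk2 : 2 * k.toNat ≤ seq.length := by omega
  have hkc : k = ((k.toNat : Nat) : Int) := by omega
  have hkrev : k.toNat < seq.length := by omega
  -- left side: slice comparison on seq.reverse
  have hslice : (PySem.List.slice seq.reverse none (some k) ==
      PySem.List.slice seq.reverse (some k) (some (2 * k))) =
      decide (k.toNat ≤ pvLcp seq.reverse (seq.reverse.drop k.toNat)) := by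
    rw [hkc]
    have h2k : (2 * ((k.toNat : Nat) : Int)) = (((2 * k.toNat : Nat)) : Int) := by push_cast; ring
    rw [PySem.List.slice_to_natCast, h2k, PySem.List.slice_natCast]
    have e : 2 * k.toNat - k.toNat = k.toNat := by omega
    rw [e]
    rw [Bool.eq_iff_iff, beq_iff_eq, decide_eq_true_iff]
    exact pv_take_eq_iff_lcp seq.reverse k.toNat hk1 (by rw [hlen]; omega)
  rw [hslice]
  -- right side: z[k] = pvZspec k = lcp
  rw [PySem.List.pyGetD_eq_getElem ((List.range seq.length).map (pvZspec seq.reverse)) (i := k) 0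
      (by omega) (by rw [List.length_map, List.length_range]; omega)]
  rw [List.getElem_map, List.getElem_range]
  unfold pvZspec
  rw [if_neg (by omega)]
  rw [decide_eq_decide]
  omega

-- ===== VERDICT (by name: the statement is the Claim_ definition above) =====
theorem lookAndSaySequence_spec : Claim_equal_lookAndSaySequence := by
  intro n l _ hpre
  unfold Spec_lookAndSaySequence lookAndSaySequence lookAndSaySequence_alt
  dsimp only
  have hfold : (PySem.List.pyRange 0 (l - 1) 1).foldl
      (fun st (_ : Int) =>
        let dic := pvMakeDict st.2
        (st.1 ++ [pvDictToListElem dic], pvDictToListElem dic)) (([n], n) : List Int × Int) =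
      (PySem.List.pyRange 0 (l - 1) 1).foldl
        (fun st (_ : Int) =>
          let nxt := pvNextAlt st.2
          (st.1 ++ [nxt], nxt)) (([n], n) : List Int × Int) := by
    rcases hpre with hn | hl
    · exact pv_fold_eq _ [n] n hn
    · rw [PySem.List.pyRange_one_eq_nil (by omega)]; rfl
  rw [hfold]
  have hne := pv_fold_fst_ne_nil (PySem.List.pyRange 0 (l - 1) 1) [n] n (by simp)
  rw [pv_flag_eq_z _ hne]
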